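-- pv_equiv track=rewrite | github.com/NullisnotFalse/coding_test_prac | 230407.py | solution
-- ===== SOURCE A (Python) =====
-- import itertools
--
-- def solution(babbling):
--     answer = 0
--     baby = ["aya", "ye", "woo", "ma"]
--     baby_babbling = []
--     for i in range(1, 5):
--         for j in itertools.permutations(baby, i):
--             baby_babbling.append(("").join(j))
--     for i in baby_babbling:
--         for j in babbling:
--             if i == j:
--                 answer += 1
--     return answer
-- ===== SOURCE B (Python) =====
-- def _removals(xs):
--     # each element of xs paired with the list of the remaining elements
--     if not xs:
--         return []
--     head, tail = xs[0], xs[1:]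
--     return [(head, tail)] + [(w, [head] + rest) for (w, rest) in _removals(tail)]
--
--
-- def _dfs(prefix, remaining, valid):
--     # depth-first: extend prefix with every still-unused baby word
--     for w, rest in _removals(remaining):
--         word = prefix + w
--         valid.add(word)
--         _dfs(word, rest, valid)
--
--
-- def solution(babbling):
--     valid = set()
--     _dfs("", ["aya", "ye", "woo", "ma"], valid)
--     answer = 0
--     for b in babbling:
--         if b in valid:
--             answer += 1
--     return answer
-- ===== Notes on version B (the rewrite author's own statement) =====
-- stated objective: faster
-- what changed: A enumerates all 64 valid baby-word concatenations via itertools.permutations and counts with a nested valid-word x babbling equality scan; B builds the valid words once by a depth-first recursion over the unused baby words into a set, then makes a single pass over babbling testing membership.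
import Mathlib
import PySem

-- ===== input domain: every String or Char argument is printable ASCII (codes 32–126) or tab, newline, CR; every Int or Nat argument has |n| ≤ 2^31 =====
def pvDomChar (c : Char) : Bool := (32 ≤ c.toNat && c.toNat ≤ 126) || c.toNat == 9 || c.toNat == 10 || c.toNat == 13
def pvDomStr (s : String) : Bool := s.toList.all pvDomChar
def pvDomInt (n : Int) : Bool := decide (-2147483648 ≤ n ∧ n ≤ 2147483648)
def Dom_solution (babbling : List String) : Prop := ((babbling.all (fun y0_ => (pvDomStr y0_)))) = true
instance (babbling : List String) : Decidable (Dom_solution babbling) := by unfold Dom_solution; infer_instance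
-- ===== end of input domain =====

-- B replaces A's permutation enumeration + nested equality scan by a DFS-built set and one
-- membership pass over babbling (objective: alternative).

-- ===== PORT A =====
def solution (babbling : List String) : Int :=
  let baby := ["aya", "ye", "woo", "ma"]
  let babyBabbling : List String :=
    (PySem.List.pyRange 1 5 1).foldl (fun acc i =>
      (PySem.List.permutations baby i.toNat).foldl (fun acc j =>
        acc ++ [PySem.Str.join "" j]) acc) []
  babyBabbling.foldl (fun answer i =>
    babbling.foldl (fun answer j => if i = j then answer + 1 else answer) answer) 0

-- ===== PORT B =====
-- each element of xs paired with the list of the remaining elements (Source B's _removals)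
def removalsB : List String → List (String × List String)
  | [] => []
  | x :: xs => (x, xs) :: (removalsB xs).map (fun p => (p.1, x :: p.2))

-- Source B's _dfs; fuel = |remaining| at the top call, so it is never exhausted
def dfsB : Nat → String → List String → PySem.Set String → PySem.Set String
  | 0, _, _, v => v
  | fuel + 1, pre, remaining, v =>
      (removalsB remaining).foldl
        (fun v p => dfsB fuel (pre ++ p.1) p.2 (PySem.Set.add v (pre ++ p.1))) v

def solution_alt (babbling : List String) : Int :=
  let valid : PySem.Set String := dfsB 4 "" ["aya", "ye", "woo", "ma"] PySem.Set.empty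
  babbling.foldl (fun answer b => if PySem.Set.contains valid b then answer + 1 else answer) 0

-- ===== PRECONDITION & SPEC =====
def Spec_solution (babbling : List String) (out : Int) : Prop := out = solution_alt babbling
instance (babbling : List String) (out : Int) : Decidable (Spec_solution babbling out) := by unfold Spec_solution; infer_instance

-- ===== CLAIM (what is proved, stated in full; the proofs are below) =====
def Claim_equal_solution : Prop := ∀ (babbling : List String), Dom_solution babbling → Spec_solution babbling (solution babbling)

-- ===== LEMMAS AND PROOFS =====

-- A's list of valid words (closed constant)
def validA : List String :=
  (PySem.List.pyRange 1 5 1).foldl (fun acc i =>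
    (PySem.List.permutations ["aya", "ye", "woo", "ma"] i.toNat).foldl (fun acc j =>
      acc ++ [PySem.Str.join "" j]) acc) []

-- B's set of valid words (closed constant)
def validB : PySem.Set String := dfsB 4 "" ["aya", "ye", "woo", "ma"] PySem.Set.empty

set_option maxRecDepth 40000 in
lemma validA_nodup : validA.Nodup := by decide

set_option maxRecDepth 40000 in
lemma validB_perm_validA : validB.Perm validA := by decide

lemma foldl_if_gen (p : String → Prop) [DecidablePred p] (M : List String) (a : Int) :
    M.foldl (fun a b => if p b then a + 1 else a) a
      = a + (M.map (fun b => if p b then (1 : Int) else 0)).sum := by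
  induction M generalizing a with
  | nil => simp
  | cons b M ih => simp only [List.foldl_cons, List.map_cons, List.sum_cons, ih]; split <;> ring

lemma foldl_add_fn (L : List String) (f : String → Int) (a : Int) :
    L.foldl (fun a i => a + f i) a = a + (L.map f).sum := by
  induction L generalizing a with
  | nil => simp
  | cons x L ih => simp only [List.foldl_cons, List.map_cons, List.sum_cons, ih]; ring

lemma sum_ind_of_nodup (L : List String) (b : String) (h : L.Nodup) :
    (L.map (fun i => if i = b then (1 : Int) else 0)).sum
      = if b ∈ L then (1 : Int) else 0 := by
  induction L with
  | nil => simp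
  | cons x L ih =>
    simp only [List.nodup_cons] at h
    simp only [List.map_cons, List.sum_cons, ih h.2, List.mem_cons]
    by_cases hx : x = b
    · subst hx
      simp [h.1]
    · simp [hx, show ¬b = x from fun h' => hx h'.symm]

lemma swap_counts (L M : List String) (h : L.Nodup) :
    (L.map (fun i => (M.map (fun j => if i = j then (1 : Int) else 0)).sum)).sum
      = (M.map (fun b => if b ∈ L then (1 : Int) else 0)).sum := by
  induction M with
  | nil => simp
  | cons b M ih =>
    simp only [List.map_cons, List.sum_cons]
    rw [List.sum_map_add, ih, sum_ind_of_nodup L b h]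

-- ===== VERDICT (by name: the statement is the Claim_ definition above) =====
theorem solution_spec : Claim_equal_solution := by
  intro babbling _
  unfold Spec_solution solution solution_alt
  show validA.foldl (fun answer i =>
      babbling.foldl (fun answer j => if i = j then answer + 1 else answer) answer) 0
    = babbling.foldl (fun answer b => if PySem.Set.contains validB b then answer + 1 else answer) 0
  have hA : validA.foldl (fun answer i =>
      babbling.foldl (fun answer j => if i = j then answer + 1 else answer) answer) 0
      = (validA.map (fun i => (babbling.map (fun j => if i = j then (1 : Int) else 0)).sum)).sum := by
    have : (fun (answer : Int) (i : String) =>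
        babbling.foldl (fun answer j => if i = j then answer + 1 else answer) answer)
        = fun answer i => answer + (babbling.map (fun j => if i = j then (1 : Int) else 0)).sum := by
      funext a i; exact foldl_if_gen (fun j => i = j) babbling a
    rw [this, foldl_add_fn]; ring
  have hcond : ∀ b, (if PySem.Set.contains validB b then (1 : Int) else 0)
      = (if b ∈ validA then (1 : Int) else 0) := by
    intro b
    by_cases h : b ∈ validA
    · have hb : b ∈ validB := validB_perm_validA.mem_iff.2 h
      simp [h, hb]
    · have hb : b ∉ validB := fun hc => h (validB_perm_validA.mem_iff.1 hc)
      simp [h, hb]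
  have hB : babbling.foldl (fun answer b => if PySem.Set.contains validB b then answer + 1 else answer) 0
      = (babbling.map (fun b => if b ∈ validA then (1 : Int) else 0)).sum := by
    rw [foldl_if_gen (fun b => PySem.Set.contains validB b = true)]
    simp only [hcond, zero_add]
  rw [hA, hB, swap_counts _ _ validA_nodup]
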